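-- pv_equiv track=rewrite | github.com/jorgerankov/TDA | Practicas/practica1.py | IzquierdaDominante
-- ===== SOURCE A (Python) =====
-- def IzquierdaDominante(arr):
-- 	if len(arr) <= 2:
-- 		return sum(arr)
--
-- 	medio = len(arr) // 2
-- 	mitad_izq = arr[:medio]
-- 	mitad_der = arr[medio:]
--
-- 	suma_izq = IzquierdaDominante(mitad_izq)
-- 	suma_der = IzquierdaDominante(mitad_der)
--
-- 	if suma_izq > suma_der:
-- 		return suma_izq + suma_der
-- 	return -1
-- ===== SOURCE B (Python) =====
-- def IzquierdaDominante(arr):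
--     # Iterative divide-and-conquer: build the split tree's pre-order as (lo, hi)
--     # index ranges with an explicit stack, then evaluate it bottom-up by scanning
--     # the pre-order backwards with a value stack.
--     order = []
--     stack = [(0, len(arr))]
--     while stack:
--         lo, hi = stack.pop()
--         order.append((lo, hi))
--         if hi - lo > 2:
--             mid = lo + (hi - lo) // 2
--             stack.append((mid, hi))
--             stack.append((lo, mid))
--     vals = []
--     for lo, hi in reversed(order):
--         if hi - lo <= 2:
--             vals.append(sum(arr[lo:hi]))
--         else:
--             left = vals.pop()
--             right = vals.pop()
--             vals.append(left + right if left > right else -1)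
--     return vals[-1]
-- ===== Notes on version B (the rewrite author's own statement) =====
-- stated objective: alternative
-- what changed: Replaces the recursive divide-and-conquer (with list slicing at each call) by an explicit two-phase iteration: a stack builds the pre-order list of (lo,hi) split ranges, then a backward scan over that list evaluates the tree bottom-up with a value stack.
import Mathlib
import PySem

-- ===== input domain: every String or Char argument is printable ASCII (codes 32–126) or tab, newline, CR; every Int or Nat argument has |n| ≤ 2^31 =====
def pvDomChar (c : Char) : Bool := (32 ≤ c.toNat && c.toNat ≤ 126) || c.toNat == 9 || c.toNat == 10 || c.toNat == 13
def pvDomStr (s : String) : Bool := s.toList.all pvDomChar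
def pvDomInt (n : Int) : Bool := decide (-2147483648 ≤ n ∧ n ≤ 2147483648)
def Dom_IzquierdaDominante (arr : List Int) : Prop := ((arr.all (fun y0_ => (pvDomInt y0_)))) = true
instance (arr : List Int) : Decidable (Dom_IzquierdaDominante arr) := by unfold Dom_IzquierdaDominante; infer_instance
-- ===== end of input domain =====

-- B replaces A's recursion by an explicit iterative divide-and-conquer: a stack builds the
-- pre-order list of (lo,hi) index ranges, then a backward scan evaluates it bottom-up
-- with a value stack (objective: alternative decomposition, same cost).


-- ===== PORT A =====
def IzquierdaDominante (arr : List Int) : Int :=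
  if arr.length ≤ 2 then arr.sum
  else
    let medio : Int := PySem.Int.floordiv (arr.length : Int) 2
    let mitad_izq := PySem.List.slice arr none (some medio)
    let mitad_der := PySem.List.slice arr (some medio) none
    let suma_izq := IzquierdaDominante mitad_izq
    let suma_der := IzquierdaDominante mitad_der
    if suma_izq > suma_der then suma_izq + suma_der else -1
termination_by arr.length
decreasing_by
  · rw [show (PySem.Int.floordiv (arr.length : Int) 2) = ((arr.length / 2 : Nat) : Int) by
      exact_mod_cast PySem.Int.floordiv_natCast arr.length 2]
    rw [PySem.List.slice_to_natCast]
    simp only [List.length_take]; omega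
  · rw [show (PySem.Int.floordiv (arr.length : Int) 2) = ((arr.length / 2 : Nat) : Int) by
      exact_mod_cast PySem.Int.floordiv_natCast arr.length 2]
    rw [PySem.List.slice_from_natCast]
    simp only [List.length_drop]; omega

-- ===== PORT B =====
-- first phase: explicit-stack construction of the pre-order list of (lo,hi) ranges
def pvBuild (stack : List (Int × Int)) (order : List (Int × Int)) : List (Int × Int) :=
  match stack with
  | [] => order
  | (lo, hi) :: rest =>
    if hi - lo > 2 then
      let mid := lo + PySem.Int.floordiv (hi - lo) 2
      pvBuild ((lo, mid) :: (mid, hi) :: rest) (order ++ [(lo, hi)])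
    else
      pvBuild rest (order ++ [(lo, hi)])
termination_by (stack.map (fun p => 3 ^ (p.2 - p.1).toNat)).sum
decreasing_by
  · simp only [List.map_cons, List.sum_cons]
    have hd2 : PySem.Int.floordiv (hi - lo) 2 = (hi - lo) / 2 :=
      PySem.Int.floordiv_eq_ediv_of_pos (by omega)
    have h1 : (lo + PySem.Int.floordiv (hi - lo) 2 - lo).toNat + 1 ≤ (hi - lo).toNat := by
      rw [hd2]; omega
    have h2 : (hi - (lo + PySem.Int.floordiv (hi - lo) 2)).toNat + 1 ≤ (hi - lo).toNat := by
      rw [hd2]; omega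
    have g1 : 3 ^ (lo + PySem.Int.floordiv (hi - lo) 2 - lo).toNat ≤ 3 ^ ((hi - lo).toNat - 1) :=
      Nat.pow_le_pow_right (by omega) (by omega)
    have g2 : 3 ^ (hi - (lo + PySem.Int.floordiv (hi - lo) 2)).toNat ≤ 3 ^ ((hi - lo).toNat - 1) :=
      Nat.pow_le_pow_right (by omega) (by omega)
    have g3 : 3 ^ ((hi - lo).toNat - 1) * 3 = 3 ^ (hi - lo).toNat := by
      rw [← pow_succ]; congr 1; omega
    have g4 : 0 < 3 ^ ((hi - lo).toNat - 1) := Nat.pow_pos (by omega)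
    omega
  · simp only [List.map_cons, List.sum_cons]
    have : 0 < 3 ^ (hi - lo).toNat := Nat.pow_pos (by omega)
    omega

-- second phase: one step of the bottom-up evaluation (value stack as a cons-list, head = top)
def pvStep (arr : List Int) (vals : List Int) (p : Int × Int) : List Int :=
  if p.2 - p.1 ≤ 2 then (PySem.List.slice arr (some p.1) (some p.2)).sum :: vals
  else
    match vals with
    | left :: right :: rest => (if left > right then left + right else -1) :: rest
    | _ => vals  -- unreachable on the states this fold produces (Python's vals.pop() never fails)

def IzquierdaDominante_alt (arr : List Int) : Int :=
  let order := pvBuild [(0, (arr.length : Int))] []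
  let vals := order.reverse.foldl (pvStep arr) []
  vals.headD 0  -- vals[-1]; the fold always ends with a singleton, the default is unreachable

-- ===== PRECONDITION & SPEC =====
def Spec_IzquierdaDominante (arr : List Int) (out : Int) : Prop := out = IzquierdaDominante_alt arr
instance (arr : List Int) (out : Int) : Decidable (Spec_IzquierdaDominante arr out) := by unfold Spec_IzquierdaDominante; infer_instance

-- ===== CLAIM (what is proved, stated in full; the proofs are below) =====
def Claim_equal_IzquierdaDominante : Prop := ∀ (arr : List Int), Dom_IzquierdaDominante arr → Spec_IzquierdaDominante arr (IzquierdaDominante arr)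

-- ===== LEMMAS AND PROOFS =====

-- the pre-order of the split tree of a range, defined recursively (proof-side spec of pvBuild)
def preord (lo hi : Int) : List (Int × Int) :=
  if hi - lo > 2 then
    let mid := lo + PySem.Int.floordiv (hi - lo) 2
    (lo, hi) :: (preord lo mid ++ preord mid hi)
  else [(lo, hi)]
termination_by (hi - lo).toNat
decreasing_by
  · have hd2 : PySem.Int.floordiv (hi - lo) 2 = (hi - lo) / 2 :=
      PySem.Int.floordiv_eq_ediv_of_pos (by omega)
    rw [hd2]; omega
  · have hd2 : PySem.Int.floordiv (hi - lo) 2 = (hi - lo) / 2 :=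
      PySem.Int.floordiv_eq_ediv_of_pos (by omega)
    rw [hd2]; omega

theorem preord_pos {lo hi : Int} (h : hi - lo > 2) :
    preord lo hi = (lo, hi) ::
      (preord lo (lo + PySem.Int.floordiv (hi - lo) 2) ++
       preord (lo + PySem.Int.floordiv (hi - lo) 2) hi) := by
  rw [preord.eq_def, if_pos h]

theorem preord_leaf {lo hi : Int} (h : ¬ hi - lo > 2) : preord lo hi = [(lo, hi)] := by
  rw [preord.eq_def, if_neg h]

theorem pvBuild_eq (stack : List (Int × Int)) (order : List (Int × Int)) :
    pvBuild stack order = order ++ (stack.map (fun p => preord p.1 p.2)).flatten := by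
  fun_induction pvBuild stack order with
  | case1 order => simp
  | case2 order lo hi rest h mid ih =>
    rw [ih]
    simp only [List.map_cons, List.flatten_cons, preord_pos h]
    simp [mid]
  | case3 order lo hi rest h ih =>
    rw [ih]
    simp only [List.map_cons, List.flatten_cons, preord_leaf h]
    simp

theorem A_split (s : List Int) (h : ¬ s.length ≤ 2) :
    IzquierdaDominante s =
      (if IzquierdaDominante (s.take (s.length / 2)) > IzquierdaDominante (s.drop (s.length / 2))
       then IzquierdaDominante (s.take (s.length / 2)) + IzquierdaDominante (s.drop (s.length / 2))
       else -1) := by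
  rw [IzquierdaDominante]
  rw [if_neg h]
  rw [show (PySem.Int.floordiv (s.length : Int) 2) = ((s.length / 2 : Nat) : Int) by
    exact_mod_cast PySem.Int.floordiv_natCast s.length 2]
  simp only [PySem.List.slice_to_natCast, PySem.List.slice_from_natCast]

theorem A_base (s : List Int) (h : s.length ≤ 2) : IzquierdaDominante s = s.sum := by
  rw [IzquierdaDominante, if_pos h]

-- the value A computes on the subarray arr[a:b] (Nat bounds)
def pvVal (arr : List Int) (a b : Nat) : Int :=
  IzquierdaDominante ((arr.drop a).take (b - a))

theorem pvEval_preord (arr : List Int) (a b : Nat) (hab : a ≤ b) (hb : b ≤ arr.length) :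
    ∀ vals : List Int,
      ((preord (a : Int) (b : Int)).reverse).foldl (pvStep arr) vals = pvVal arr a b :: vals := by
  have hlen : ((arr.drop a).take (b - a)).length = b - a := by
    simp; omega
  by_cases h : (b : Int) - (a : Int) > 2
  · -- internal node
    have hd2 : PySem.Int.floordiv ((b : Int) - (a : Int)) 2 = ((b - a) / 2 : Nat) := by
      rw [show ((b : Int) - (a : Int)) = (((b - a : Nat)) : Int) by omega]
      exact_mod_cast PySem.Int.floordiv_natCast (b - a) 2
    have hmid : (a : Int) + PySem.Int.floordiv ((b : Int) - (a : Int)) 2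
        = ((a + (b - a) / 2 : Nat) : Int) := by rw [hd2]; push_cast; ring
    set m : Nat := a + (b - a) / 2 with hm
    have ham : a ≤ m := by omega
    have hmb : m ≤ b := by omega
    intro vals
    rw [preord_pos h]
    have IHL := pvEval_preord arr a m ham (by omega)
    have IHR := pvEval_preord arr m b hmb hb
    simp only [hmid, List.reverse_cons, List.reverse_append, List.foldl_append]
    rw [IHR, IHL]
    simp only [List.foldl_cons, List.foldl_nil, pvStep]
    rw [if_neg (by omega : ¬((b : Int) - (a : Int) ≤ 2))]
    -- combine equals A on the whole subarray, by A_split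
    have hs := A_split ((arr.drop a).take (b - a)) (by omega)
    have hhalf : ((arr.drop a).take (b - a)).length / 2 = (b - a) / 2 := by rw [hlen]
    have htake : ((arr.drop a).take (b - a)).take ((b - a) / 2) = (arr.drop a).take (m - a) := by
      rw [List.take_take]; congr 1; omega
    have hdrop : ((arr.drop a).take (b - a)).drop ((b - a) / 2) = (arr.drop m).take (b - m) := by
      rw [List.drop_take, List.drop_drop]
      congr 1
      omega
    rw [hhalf, htake, hdrop] at hs
    unfold pvVal
    rw [hs]
  · -- leaf
    intro vals
    rw [preord_leaf h]
    simp only [List.reverse_cons, List.reverse_nil, List.nil_append, List.foldl_cons,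
      List.foldl_nil, pvStep]
    rw [if_pos (by omega : ((b : Int) - (a : Int) ≤ 2))]
    unfold pvVal
    rw [A_base _ (by omega)]
    congr 1
    rw [PySem.List.slice_natCast]
termination_by (b - a : Nat)
decreasing_by
  · omega
  · omega

-- ===== VERDICT (by name: the statement is the Claim_ definition above) =====
theorem IzquierdaDominante_spec : Claim_equal_IzquierdaDominante := by
  intro arr _
  unfold Spec_IzquierdaDominante IzquierdaDominante_alt
  rw [pvBuild_eq]
  simp only [List.map_cons, List.map_nil, List.flatten_cons, List.flatten_nil,
    List.append_nil, List.nil_append]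
  rw [show (0 : Int) = ((0 : Nat) : Int) from rfl]
  rw [pvEval_preord arr 0 arr.length (by omega) (le_refl _)]
  unfold pvVal
  simp
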